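-- pv_equiv track=rewrite | github.com/lord483/Project-Euler-Solutions | src/051-100/P051-combi-prime.py | hasThreeRepeating
-- ===== SOURCE A (Python) =====
-- def hasThreeRepeating(n):
--     '''
--     you don't have to check the primes with two or four recurring digits.
--     If you form 8 different numbers with them, at least once the sum of the digits (and the whole number)
--     is divisible by three.
--     '''
--     numberList = list(str(n))
--     numberList.sort()
--     s = ""
--     for i in numberList:
--         s += str(i)
--
--     for c in s:
--         if (s.rfind(c) - s.find(c)) == 2:
--             return True
--
--     return False
-- ===== SOURCE B (Python) =====
-- from collections import Counter
--
-- def hasThreeRepeating(n):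
--     return 3 in Counter(str(n)).values()
-- ===== Notes on version B (the rewrite author's own statement) =====
-- stated objective: simpler
-- what changed: Replaces sort + per-character find/rfind positional scans with a single digit-frequency table (Counter) and a membership test on its counts.
import Mathlib
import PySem

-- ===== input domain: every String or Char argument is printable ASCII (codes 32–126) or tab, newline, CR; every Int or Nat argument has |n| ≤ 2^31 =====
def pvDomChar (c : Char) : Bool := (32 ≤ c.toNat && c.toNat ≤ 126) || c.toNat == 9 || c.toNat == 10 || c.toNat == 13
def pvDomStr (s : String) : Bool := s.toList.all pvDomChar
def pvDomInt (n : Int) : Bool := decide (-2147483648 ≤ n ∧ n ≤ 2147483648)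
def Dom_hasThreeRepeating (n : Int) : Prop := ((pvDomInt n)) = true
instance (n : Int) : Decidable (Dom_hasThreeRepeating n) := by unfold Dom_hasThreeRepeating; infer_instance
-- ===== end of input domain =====

-- B replaces A's sort + per-character find/rfind positional scans by one frequency table
-- (Counter) and a membership test over its counts (objective: simpler).

-- ===== PORT A =====
def hasThreeRepeating (n : Int) : Bool :=
  let numberList := PySem.Int.toChars n
  let numberList := PySem.List.sorted numberList (fun x => x) false
  let s := numberList.foldl (fun acc i => acc ++ [i]) ([] : List Char)
  s.any (fun c => PySem.Chars.rfind s [c] - PySem.Chars.find s [c] == 2)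

-- ===== PORT B =====
def hasThreeRepeating_alt (n : Int) : Bool :=
  (PySem.Dict.counter (PySem.Int.toChars n)).values.contains 3

-- ===== PRECONDITION & SPEC =====
def Spec_hasThreeRepeating (n : Int) (out : Bool) : Prop := out = hasThreeRepeating_alt n
instance (n : Int) (out : Bool) : Decidable (Spec_hasThreeRepeating n out) := by unfold Spec_hasThreeRepeating; infer_instance

-- ===== CLAIM (what is proved, stated in full; the proofs are below) =====
def Claim_equal_hasThreeRepeating : Prop := ∀ (n : Int), Dom_hasThreeRepeating n → Spec_hasThreeRepeating n (hasThreeRepeating n)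

-- ===== LEMMAS AND PROOFS =====

theorem pv_prefix_drop (c : Char) (l : List Char) (j : Nat) :
    [c].isPrefixOf (l.drop j) = true ↔ l[j]? = some c := by
  rw [List.isPrefixOf_iff_prefix, ← List.head?_drop]
  cases h : (l.drop j) with
  | nil => simp
  | cons a t => simp [List.cons_prefix_iff, eq_comm]

theorem pv_find_go_singleton (c : Char) (u w : List Char) (hc : c ∉ u) (k : Nat) :
    PySem.Chars.find.go [c] (u ++ c :: w) k = (k + u.length : Int) := by
  induction u generalizing k with
  | nil => simp [PySem.Chars.find.go, List.isPrefixOf]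
  | cons h t ih =>
    have hne : (c == h) = false := by
      simp only [List.mem_cons, not_or] at hc
      simp [hc.1]
    rw [List.cons_append]
    rw [PySem.Chars.find.go]
    simp only [List.isPrefixOf, hne, Bool.false_and, if_neg Bool.false_ne_true]
    rw [ih (by simp_all [List.mem_cons]) (k+1)]
    simp [List.length_cons]; omega

theorem pv_find_singleton (c : Char) (u w : List Char) (hc : c ∉ u) :
    PySem.Chars.find (u ++ c :: w) [c] = (u.length : Int) := by
  have := pv_find_go_singleton c u w hc 0
  simpa [PySem.Chars.find] using this

theorem pv_rfind_go_hit (c : Char) (l : List Char) (j : Nat) (h : l[j]? = some c) :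
    PySem.Chars.rfind.go l [c] j = (j : Int) := by
  cases j with
  | zero =>
    rw [PySem.Chars.rfind.go]
    rw [if_pos (show [c].isPrefixOf l = true by
      exact (pv_prefix_drop c l 0).2 (by simpa using h))]
    simp
  | succ i =>
    rw [PySem.Chars.rfind.go, if_pos ((pv_prefix_drop c l (i+1)).2 h)]

theorem pv_rfind_go_skip (c : Char) (l : List Char) (j d : Nat)
    (h : ∀ i, j < i → i ≤ j + d → l[i]? ≠ some c) :
    PySem.Chars.rfind.go l [c] (j + d) = PySem.Chars.rfind.go l [c] j := by
  induction d with
  | zero => rfl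
  | succ d ih =>
    have step : PySem.Chars.rfind.go l [c] (j + d + 1) = PySem.Chars.rfind.go l [c] (j + d) := by
      rw [PySem.Chars.rfind.go]
      rw [if_neg (by
        intro hp
        exact h (j + d + 1) (by omega) (by omega) ((pv_prefix_drop c l (j+d+1)).1 hp))]
    rw [show j + (d+1) = j + d + 1 from rfl, step, ih (fun i h1 h2 => h i h1 (by omega))]

theorem pv_rfind_singleton (c : Char) (u v : List Char) (m : Nat) (hm : 0 < m) (hv : c ∉ v) :
    PySem.Chars.rfind (u ++ List.replicate m c ++ v) [c] = ((u.length + m - 1 : Nat) : Int) := by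
  set l := u ++ List.replicate m c ++ v with hl
  have hlen : l.length = u.length + m + v.length := by simp [hl]; omega
  have hhit : l[u.length + m - 1]? = some c := by
    rw [hl, List.append_assoc, List.getElem?_append_right (by omega)]
    rw [List.getElem?_append_left (by simp; omega)]
    simp [List.getElem?_replicate]
    omega
  have hskip : ∀ i, u.length + m - 1 < i → i ≤ u.length + m - 1 + (v.length + 1) →
      l[i]? ≠ some c := by
    intro i h1 h2 hEq
    by_cases hiL : i < l.length
    · have hub : u.length + m ≤ i := by omega
      rw [hl, List.append_assoc, List.getElem?_append_right (by omega)] at hEq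
      rw [List.getElem?_append_right (by simp; omega)] at hEq
      exact hv (List.mem_of_getElem? hEq)
    · rw [List.getElem?_eq_none (by omega)] at hEq
      simp at hEq
  have : PySem.Chars.rfind.go l [c] l.length = (↑(u.length + m - 1) : Int) := by
    have he : l.length = (u.length + m - 1) + (v.length + 1) := by omega
    rw [he, pv_rfind_go_skip c l _ _ hskip, pv_rfind_go_hit c l _ hhit]
  simpa [PySem.Chars.rfind] using this

theorem pv_sorted_block (t : List Char) (hs : t.Pairwise (· ≤ ·)) (c : Char) (hc : c ∈ t) :
    ∃ u v, t = u ++ List.replicate (t.count c) c ++ v ∧ c ∉ u ∧ c ∉ v ∧ 0 < t.count c := by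
  refine ⟨t.filter (fun x => decide (x < c)), t.filter (fun x => decide (c < x)), ?_, ?_, ?_, ?_⟩
  · set u := t.filter (fun x => decide (x < c)) with hu
    set b := t.filter (fun x => x == c) with hb
    set v := t.filter (fun x => decide (c < x)) with hv
    have e1 : ((t.filter (fun x => !decide (x < c))).filter (fun x => x == c)) = b := by
      rw [List.filter_filter]
      apply List.filter_congr
      intro x _
      by_cases hx : x = c <;> simp [hx]
    have e2 : ((t.filter (fun x => !decide (x < c))).filter (fun x => !(x == c))) = v := by
      rw [List.filter_filter]
      apply List.filter_congr
      intro x _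
      by_cases hx : x = c
      · simp [hx]
      · by_cases hlt : x < c
        · simp [hlt, lt_asymm hlt]
        · simp [hx, hlt, lt_of_le_of_ne (not_lt.mp hlt) (Ne.symm hx)]
    have h2 := List.filter_append_perm (fun x => x == c) (t.filter (fun x => !decide (x < c)))
    rw [e1, e2] at h2
    have h1 := List.filter_append_perm (fun x => decide (x < c)) t
    have hperm : (u ++ (b ++ v)).Perm t := (h2.append_left u).trans h1
    have hpw : (u ++ (b ++ v)).Pairwise (· ≤ ·) := by
      rw [List.pairwise_append]
      refine ⟨hs.sublist (List.filter_sublist), ?_, ?_⟩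
      · rw [List.pairwise_append]
        refine ⟨hs.sublist (List.filter_sublist), hs.sublist (List.filter_sublist), ?_⟩
        intro a ha x hx
        have ha' : a = c := by simpa using (List.mem_filter.1 ha).2
        have hx' : c < x := by simpa using (List.mem_filter.1 hx).2
        rw [ha']; exact le_of_lt hx'
      · intro a ha x hx
        have ha' : a < c := by simpa using (List.mem_filter.1 ha).2
        rcases List.mem_append.1 hx with h | h
        · have : x = c := by simpa using (List.mem_filter.1 h).2
          rw [this]; exact le_of_lt ha'
        · have : c < x := by simpa using (List.mem_filter.1 h).2
          exact le_of_lt (ha'.trans this)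
    have hsrt : PySem.List.sorted t (fun x => x) false = t :=
      PySem.List.sorted_eq_self_of_pairwise t (fun x => x) hs
    have hsrt2 : PySem.List.sorted t (fun x => x) false = u ++ (b ++ v) :=
      PySem.List.sorted_id_eq_of_perm_of_pairwise t (u ++ (b ++ v)) hperm hpw
    have hbr : b = List.replicate (t.count c) c := by
      rw [hb]; exact List.filter_beq c
    rw [List.append_assoc, ← hbr]
    rw [← hsrt, hsrt2]
  · intro hmem
    have := (List.mem_filter.1 hmem).2
    simp at this
  · intro hmem
    have := (List.mem_filter.1 hmem).2
    simp at this
  · exact List.count_pos_iff.2 hc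

theorem pv_diff_eq_count (t : List Char) (hs : t.Pairwise (· ≤ ·)) (c : Char) (hc : c ∈ t) :
    PySem.Chars.rfind t [c] - PySem.Chars.find t [c] = (t.count c : Int) - 1 := by
  obtain ⟨u, v, ht, hu, hv, hm⟩ := pv_sorted_block t hs c hc
  obtain ⟨k, hk⟩ : ∃ k, t.count c = k + 1 := ⟨t.count c - 1, by omega⟩
  rw [hk] at ht
  have hfind : PySem.Chars.find t [c] = (u.length : Int) := by
    have ht' : t = u ++ c :: (List.replicate k c ++ v) := by
      rw [ht, List.replicate_succ]
      simp
    conv_lhs => rw [ht']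
    exact pv_find_singleton c u _ hu
  have hrfind : PySem.Chars.rfind t [c] = ((u.length + (k + 1) - 1 : Nat) : Int) := by
    conv_lhs => rw [ht]
    exact pv_rfind_singleton c u v (k + 1) (by omega) hv
  rw [hfind, hrfind, hk]
  push_cast
  omega

theorem hasThreeRepeating_eq_exists (n : Int) :
    hasThreeRepeating n = true ↔
      ∃ c ∈ PySem.Int.toChars n, (PySem.Int.toChars n).count c = 3 := by
  set l := PySem.Int.toChars n with hl
  set t := PySem.List.sorted l (fun x => x) false with htdef
  have hfold : t.foldl (fun acc i => acc ++ [i]) ([] : List Char) = t := by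
    simpa using PySem.List.foldl_append_singleton t ([] : List Char)
  have hA : hasThreeRepeating n =
      t.any (fun c => PySem.Chars.rfind t [c] - PySem.Chars.find t [c] == 2) := by
    simp only [hasThreeRepeating]
    rw [← hl, ← htdef, hfold]
  have hpw : t.Pairwise (· ≤ ·) := by
    simpa using PySem.List.sorted_pairwise l (fun x => x)
  have hperm : t.Perm l := PySem.List.sorted_perm l (fun x => x) false
  rw [hA, List.any_eq_true]
  constructor
  · rintro ⟨c, hct, hp⟩
    rw [beq_iff_eq, pv_diff_eq_count t hpw c hct] at hp
    exact ⟨c, hperm.mem_iff.1 hct, by have := hperm.count_eq c; omega⟩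
  · rintro ⟨c, hcl, hcount⟩
    have hct : c ∈ t := hperm.mem_iff.2 hcl
    refine ⟨c, hct, ?_⟩
    rw [beq_iff_eq, pv_diff_eq_count t hpw c hct]
    have := hperm.count_eq c
    omega

theorem hasThreeRepeating_alt_eq_exists (n : Int) :
    hasThreeRepeating_alt n = true ↔
      ∃ c ∈ PySem.Int.toChars n, (PySem.Int.toChars n).count c = 3 := by
  set l := PySem.Int.toChars n with hl
  unfold hasThreeRepeating_alt
  rw [← hl]
  simp only [PySem.Dict.values, PySem.Dict.items_counter, List.map_map]
  rw [List.contains_iff_mem]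
  simp only [List.mem_map, Function.comp]
  constructor
  · rintro ⟨k, hk, hkv⟩
    refine ⟨k, (PySem.Set.mem_ofList _ _).1 hk, ?_⟩
    exact_mod_cast hkv
  · rintro ⟨c, hcl, hcount⟩
    exact ⟨c, (PySem.Set.mem_ofList _ _).2 hcl, by exact_mod_cast hcount⟩


-- ===== VERDICT (by name: the statement is the Claim_ definition above) =====
theorem hasThreeRepeating_spec : Claim_equal_hasThreeRepeating := by
  intro n _
  unfold Spec_hasThreeRepeating
  rw [Bool.eq_iff_iff, hasThreeRepeating_eq_exists, hasThreeRepeating_alt_eq_exists]
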